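-- pv_equiv track=rewrite | github.com/virginiakm1988/s3adapter | s3prl/s3prl/downstream/ensemble_runner.py | parse_blank_pos
-- ===== SOURCE A (Python) =====
-- def parse_blank_pos(blank):
--     new_blank = []
--     cnt_ = 0
--     for _i, e in enumerate(blank):
--         if e:
--             cnt_ += 1
--         else:
--             if not _i or blank[_i - 1]:
--                 new_blank.append(cnt_)
--
--     return new_blank
-- ===== SOURCE B (Python) =====
-- def parse_blank_pos(blank):
--     # Run-based scan: consume each truthy run at once (adding its length to cnt)
--     # and emit cnt exactly once per falsy run.
--     new_blank = []
--     cnt = 0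
--     i = 0
--     n = len(blank)
--     while i < n:
--         if blank[i]:
--             j = i
--             while j < n and blank[j]:
--                 j += 1
--             cnt += j - i
--             i = j
--         else:
--             new_blank.append(cnt)
--             i += 1
--             while i < n and not blank[i]:
--                 i += 1
--     return new_blank
-- ===== Notes on version B (the rewrite author's own statement) =====
-- stated objective: alternative
-- what changed: Replaced the per-element loop that re-reads blank[i-1] with a run-based two-level scan: consume each truthy run at once adding its length to the counter, and append the counter exactly once per falsy run.
import Mathlib
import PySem

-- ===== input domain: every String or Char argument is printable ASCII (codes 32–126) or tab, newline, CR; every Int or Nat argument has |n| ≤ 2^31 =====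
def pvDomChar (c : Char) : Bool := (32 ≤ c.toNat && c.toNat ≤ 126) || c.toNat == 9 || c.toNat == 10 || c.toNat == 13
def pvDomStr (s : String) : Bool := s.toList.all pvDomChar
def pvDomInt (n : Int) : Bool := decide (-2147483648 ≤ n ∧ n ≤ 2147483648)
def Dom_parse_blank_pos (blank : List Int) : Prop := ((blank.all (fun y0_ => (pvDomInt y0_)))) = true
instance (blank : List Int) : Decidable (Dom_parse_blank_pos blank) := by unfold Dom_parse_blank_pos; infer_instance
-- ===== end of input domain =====

-- B replaces A's per-element loop (which re-reads blank[i-1]) with a run-based scan; objective: alternative, same O(n) cost.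


-- ===== PORT A =====
-- literal port of A: fold over enumerate(blank) carrying (new_blank, cnt_);
-- `blank[_i - 1]` is PySem.List.pyGet? (in range whenever reached, so `.any` of none never occurs).
def parse_blank_pos (blank : List Int) : List Int :=
  ((PySem.List.enumerate blank).foldl
    (fun (st : List Int × Int) (p : Int × Int) =>
      if p.2 != 0 then (st.1, st.2 + 1)
      else if p.1 == 0 || (PySem.List.pyGet? blank (p.1 - 1)).any (· != 0)
        then (st.1 ++ [st.2], st.2)
        else st)
    ([], 0)).1

-- ===== PORT B =====
-- run-based scan: the inner `while blank[j]` run scans become takeWhile/dropWhile over the same run.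
def pbpAltGo (cnt : Int) : List Int → List Int
  | [] => []
  | e :: rest =>
    if e != 0 then
      pbpAltGo (cnt + (((e :: rest).takeWhile (· != 0)).length : Int))
               ((e :: rest).dropWhile (· != 0))
    else
      cnt :: pbpAltGo cnt (rest.dropWhile (· == 0))
termination_by l => l.length
decreasing_by
  all_goals simp_all
  all_goals first
    | exact Nat.lt_succ_of_le (List.length_dropWhile_le _ _)
    | exact List.length_dropWhile_le _ _

def parse_blank_pos_alt (blank : List Int) : List Int := pbpAltGo 0 blank

-- ===== PRECONDITION & SPEC =====
def Spec_parse_blank_pos (blank : List Int) (out : List Int) : Prop := out = parse_blank_pos_alt blank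
instance (blank : List Int) (out : List Int) : Decidable (Spec_parse_blank_pos blank out) := by unfold Spec_parse_blank_pos; infer_instance

-- ===== CLAIM (what is proved, stated in full; the proofs are below) =====
def Claim_equal_parse_blank_pos : Prop := ∀ (blank : List Int), Dom_parse_blank_pos blank → Spec_parse_blank_pos blank (parse_blank_pos blank)

-- ===== LEMMAS AND PROOFS =====

-- A's loop rephrased structurally: carry the previous element instead of indexing blank[_i-1].
def pbpARec : Option Int → List Int × Int → List Int → List Int × Int
  | _, st, [] => st
  | prev, st, e :: rest =>
    if e != 0 then pbpARec (some e) (st.1, st.2 + 1) rest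
    else if prev.all (· != 0) then pbpARec (some e) (st.1 ++ [st.2], st.2) rest
    else pbpARec (some e) st rest

theorem pbp_bridge (blank : List Int) : ∀ (suf pre : List Int), blank = pre ++ suf →
    ∀ (st : List Int × Int),
    ((PySem.List.enumerate suf (pre.length : Int)).foldl
      (fun (st : List Int × Int) (p : Int × Int) =>
        if p.2 != 0 then (st.1, st.2 + 1)
        else if p.1 == 0 || (PySem.List.pyGet? blank (p.1 - 1)).any (· != 0)
          then (st.1 ++ [st.2], st.2)
          else st)
      st) = pbpARec pre.getLast? st suf := by
  intro suf
  induction suf with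
  | nil => intro pre hpre st; simp [pbpARec, PySem.List.enumerate_nil]
  | cons e rest ih =>
    intro pre hpre st
    have h1 : ((pre.length : Int) + 1) = (((pre ++ [e]).length : Nat) : Int) := by simp
    have h2 : blank = (pre ++ [e]) ++ rest := by simp [hpre]
    rw [PySem.List.enumerate_cons, List.foldl_cons]
    by_cases he : (e != 0) = true
    · simp only [he, if_pos]
      rw [h1, ih (pre ++ [e]) h2]
      simp [pbpARec, he]
    · have hcond : (((pre.length : Int)) == 0 || (PySem.List.pyGet? blank ((pre.length : Int) - 1)).any (· != 0))
          = pre.getLast?.all (· != 0) := by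
        rcases List.eq_nil_or_concat pre with h | ⟨pre0, p, h⟩
        · subst h; simp
        · subst h
          simp only [List.concat_eq_append] at *
          have hl : ((pre0 ++ [p]).length : Int) - 1 = ((pre0.length : Nat) : Int) := by simp
          have hb : blank = pre0 ++ p :: (e :: rest) := by simp [hpre]
          rw [hl, hb, PySem.List.pyGet?_append_length]
          simp
          omega
      simp only [Bool.not_eq_true] at he
      simp only [he, Bool.false_eq_true, if_false, hcond]
      by_cases hp : pre.getLast?.all (· != 0) = true
      · simp only [hp, if_pos]
        rw [h1, ih (pre ++ [e]) h2]
        simp [pbpARec, he, hp]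
      · simp only [Bool.not_eq_true] at hp
        simp only [hp, Bool.false_eq_true, if_false]
        rw [h1, ih (pre ++ [e]) h2]
        simp [pbpARec, he, hp]

theorem pbp_a_eq (blank : List Int) : parse_blank_pos blank = (pbpARec none ([], 0) blank).1 := by
  have h := pbp_bridge blank blank [] rfl ([], 0)
  simp only [List.length_nil, Nat.cast_zero, List.getLast?_nil] at h
  unfold parse_blank_pos
  exact congrArg Prod.fst h

theorem pbp_altGo_cons_truthy (e : Int) (rest : List Int) (cnt : Int) (he : (e != 0) = true) :
    pbpAltGo cnt (e :: rest) = pbpAltGo (cnt + 1) rest := by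
  rw [pbpAltGo]
  simp only [if_pos, List.takeWhile_cons, List.dropWhile_cons, he]
  cases rest with
  | nil => simp [pbpAltGo]
  | cons r rr =>
    by_cases hr : (r != 0) = true
    · rw [pbpAltGo.eq_def (cnt + 1) (r :: rr)]
      simp only [if_pos, List.takeWhile_cons, hr]
      simp only [List.length_cons]
      congr 1
      push_cast
      ring
    · simp only [Bool.not_eq_true] at hr
      simp only [List.takeWhile_cons, hr, Bool.false_eq_true, if_false,
        List.dropWhile_cons]
      norm_num

theorem pbp_combined (l : List Int) :
    (∀ prev, prev.all (fun v => v != 0) = true → ∀ st : List Int × Int,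
        (pbpARec prev st l).1 = st.1 ++ pbpAltGo st.2 l)
    ∧ (∀ p : Int, (p != 0) = false → ∀ st : List Int × Int,
        (pbpARec (some p) st l).1 = st.1 ++ pbpAltGo st.2 (l.dropWhile (· == 0))) := by
  induction l with
  | nil => constructor <;> intro _ _ _ <;> simp [pbpARec, pbpAltGo]
  | cons e rest ih =>
    constructor
    · intro prev hprev st
      by_cases he : (e != 0) = true
      · rw [pbpARec]
        simp only [he, if_pos]
        rw [ih.1 (some e) (by simpa using he)]
        rw [pbp_altGo_cons_truthy e rest st.2 he]
      · simp only [Bool.not_eq_true] at he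
        rw [pbpARec]
        simp only [he, Bool.false_eq_true, if_false, hprev, if_pos]
        rw [ih.2 e he]
        rw [pbpAltGo.eq_def st.2 (e :: rest)]
        simp [he]
    · intro p hp st
      by_cases he : (e != 0) = true
      · rw [pbpARec]
        simp only [he, if_pos]
        rw [ih.1 (some e) (by simpa using he)]
        have hd : (e :: rest).dropWhile (· == 0) = e :: rest := by
          simp only [List.dropWhile_cons]
          simp_all
        rw [hd, pbp_altGo_cons_truthy e rest st.2 he]
      · simp only [Bool.not_eq_true] at he
        rw [pbpARec]
        have hpall : (some p).all (· != 0) = false := by simpa using hp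
        simp only [he, Bool.false_eq_true, if_false, hpall]
        rw [ih.2 e he]
        have hd : (e :: rest).dropWhile (· == 0) = rest.dropWhile (· == 0) := by
          simp only [List.dropWhile_cons]
          simp_all
        rw [hd]

-- ===== VERDICT (by name: the statement is the Claim_ definition above) =====
theorem parse_blank_pos_spec : Claim_equal_parse_blank_pos := by
  intro blank _
  unfold Spec_parse_blank_pos parse_blank_pos_alt
  rw [pbp_a_eq]
  simpa using (pbp_combined blank).1 none rfl ([], 0)
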